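-- pv_equiv track=rewrite | github.com/takahiro-777/tf-dqn-reversi | ggf_pre-processing.py | pos_str2pos_index
-- ===== SOURCE A (Python) =====
-- gCol = ('A','B','C','D','E','F','G','H')
--
-- gRow = ('1','2','3','4','5','6','7','8')
--
-- def pos_str2pos_index(pos_str):
--     pos_index = []
--     for i, c in enumerate(gRow):
--         if pos_str[1] == c:
--             pos_index.append(i)
--
--     for i, c in enumerate(gCol):
--         if pos_str[0] == c:
--             pos_index.append(i)
--
--
--     return pos_index
-- ===== SOURCE B (Python) =====
-- def pos_str2pos_index(pos_str):
--     pos_index = []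
--     r = ord(pos_str[1]) - ord('1')
--     if 0 <= r < 8:
--         pos_index.append(r)
--     c = ord(pos_str[0]) - ord('A')
--     if 0 <= c < 8:
--         pos_index.append(c)
--     return pos_index
-- ===== Notes on version B (the rewrite author's own statement) =====
-- stated objective: idiomatic
-- what changed: Replaces the two linear membership scans over the gRow/gCol tuples by closed-form arithmetic on character codes (subtract the base row/column code, append when the offset lies in range 0..7).
import Mathlib
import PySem

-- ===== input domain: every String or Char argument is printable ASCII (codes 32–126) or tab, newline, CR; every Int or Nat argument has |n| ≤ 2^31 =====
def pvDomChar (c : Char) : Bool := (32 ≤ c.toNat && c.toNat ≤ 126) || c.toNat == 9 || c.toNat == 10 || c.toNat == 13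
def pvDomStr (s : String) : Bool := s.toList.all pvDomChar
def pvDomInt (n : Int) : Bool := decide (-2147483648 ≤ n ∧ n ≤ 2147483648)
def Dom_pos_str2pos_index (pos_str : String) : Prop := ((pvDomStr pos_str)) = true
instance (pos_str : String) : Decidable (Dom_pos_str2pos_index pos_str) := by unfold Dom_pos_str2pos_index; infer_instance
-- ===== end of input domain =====

-- B replaces the two linear scans over gRow/gCol by closed-form character arithmetic with a range guard (idiomatic; same output and same IndexError behaviour).

-- ===== PORT A =====
def gRow : List Char := ['1','2','3','4','5','6','7','8']
def gCol : List Char := ['A','B','C','D','E','F','G','H']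

def pos_str2pos_index (pos_str : String) : List Int :=
  match PySem.Str.pyGet? pos_str 1, PySem.Str.pyGet? pos_str 0 with
  | some c1, some c0 =>
      -- for i, c in enumerate(gRow): if pos_str[1] == c: pos_index.append(i)
      let l1 := (PySem.List.enumerate gRow).foldl
        (fun acc (ic : Int × Char) => if c1 = ic.2 then acc ++ [ic.1] else acc) []
      -- for i, c in enumerate(gCol): if pos_str[0] == c: pos_index.append(i)
      (PySem.List.enumerate gCol).foldl
        (fun acc (ic : Int × Char) => if c0 = ic.2 then acc ++ [ic.1] else acc) l1
  | _, _ => []  -- Python raises IndexError here (len < 2); excluded by Pre_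

-- ===== PORT B =====
def pos_str2pos_index_alt (pos_str : String) : List Int :=
  match PySem.Str.pyGet? pos_str 1 with
  | none => []  -- Python raises IndexError here (len < 2); excluded by Pre_
  | some c1 =>
    match PySem.Str.pyGet? pos_str 0 with
    | none => []  -- Python raises IndexError here; excluded by Pre_
    | some c0 =>
      let r : Int := (c1.toNat : Int) - 49   -- ord(pos_str[1]) - ord('1')
      let l := if 0 ≤ r ∧ r < 8 then [r] else []
      let c : Int := (c0.toNat : Int) - 65   -- ord(pos_str[0]) - ord('A')
      if 0 ≤ c ∧ c < 8 then l ++ [c] else l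

-- ===== PRECONDITION & SPEC =====
-- Pre_ excludes exactly the strings of length < 2, on which Python A raises IndexError.
def Pre_pos_str2pos_index (pos_str : String) : Prop := 2 ≤ pos_str.toList.length
instance (pos_str : String) : Decidable (Pre_pos_str2pos_index pos_str) := by unfold Pre_pos_str2pos_index; infer_instance
def pvWitness_pos_str2pos_index : String := "A1"

def Spec_pos_str2pos_index (pos_str : String) (out : List Int) : Prop := out = pos_str2pos_index_alt pos_str
instance (pos_str : String) (out : List Int) : Decidable (Spec_pos_str2pos_index pos_str out) := by unfold Spec_pos_str2pos_index; infer_instance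

-- ===== CLAIM (what is proved, stated in full; the proofs are below) =====
def Claim_equal_pos_str2pos_index : Prop := ∀ (pos_str : String), Dom_pos_str2pos_index pos_str → Pre_pos_str2pos_index pos_str → Spec_pos_str2pos_index pos_str (pos_str2pos_index pos_str)

-- ===== LEMMAS AND PROOFS =====

-- a character is determined by its code
lemma char_eq_of_toNat_eq {c d : Char} (h : c.toNat = d.toNat) : c = d := by
  apply Char.ext
  exact UInt32.toNat_inj.mp h

lemma row_scan_eq (c : Char) :
    (PySem.List.enumerate gRow).foldl
        (fun acc (ic : Int × Char) => if c = ic.2 then acc ++ [ic.1] else acc) [] =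
      (if 0 ≤ (c.toNat : Int) - 49 ∧ (c.toNat : Int) - 49 < 8 then [(c.toNat : Int) - 49] else []) := by
  simp only [gRow, PySem.List.enumerate, PySem.List.enumerate_cons, List.foldl]
  by_cases h1 : c = '1'; · subst h1; decide
  by_cases h2 : c = '2'; · subst h2; decide
  by_cases h3 : c = '3'; · subst h3; decide
  by_cases h4 : c = '4'; · subst h4; decide
  by_cases h5 : c = '5'; · subst h5; decide
  by_cases h6 : c = '6'; · subst h6; decide
  by_cases h7 : c = '7'; · subst h7; decide
  by_cases h8 : c = '8'; · subst h8; decide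
  simp only [h1, h2, h3, h4, h5, h6, h7, h8, if_false]
  rw [if_neg]
  rintro ⟨hlo, hhi⟩
  have hn : c.toNat = 49 ∨ c.toNat = 50 ∨ c.toNat = 51 ∨ c.toNat = 52 ∨ c.toNat = 53 ∨ c.toNat = 54 ∨ c.toNat = 55 ∨ c.toNat = 56 := by omega
  rcases hn with h|h|h|h|h|h|h|h
  · exact h1 (char_eq_of_toNat_eq h)
  · exact h2 (char_eq_of_toNat_eq h)
  · exact h3 (char_eq_of_toNat_eq h)
  · exact h4 (char_eq_of_toNat_eq h)
  · exact h5 (char_eq_of_toNat_eq h)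
  · exact h6 (char_eq_of_toNat_eq h)
  · exact h7 (char_eq_of_toNat_eq h)
  · exact h8 (char_eq_of_toNat_eq h)

lemma col_scan_eq (c : Char) (l : List Int) :
    (PySem.List.enumerate gCol).foldl
        (fun acc (ic : Int × Char) => if c = ic.2 then acc ++ [ic.1] else acc) l =
      (if 0 ≤ (c.toNat : Int) - 65 ∧ (c.toNat : Int) - 65 < 8 then l ++ [(c.toNat : Int) - 65] else l) := by
  simp only [gCol, PySem.List.enumerate, PySem.List.enumerate_cons, List.foldl]
  by_cases h1 : c = 'A'; · subst h1; simp
  by_cases h2 : c = 'B'; · subst h2; simp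
  by_cases h3 : c = 'C'; · subst h3; simp
  by_cases h4 : c = 'D'; · subst h4; simp
  by_cases h5 : c = 'E'; · subst h5; simp
  by_cases h6 : c = 'F'; · subst h6; simp
  by_cases h7 : c = 'G'; · subst h7; simp
  by_cases h8 : c = 'H'; · subst h8; simp
  simp only [h1, h2, h3, h4, h5, h6, h7, h8, if_false]
  rw [if_neg]
  rintro ⟨hlo, hhi⟩
  have hn : c.toNat = 65 ∨ c.toNat = 66 ∨ c.toNat = 67 ∨ c.toNat = 68 ∨ c.toNat = 69 ∨ c.toNat = 70 ∨ c.toNat = 71 ∨ c.toNat = 72 := by omega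
  rcases hn with h|h|h|h|h|h|h|h
  · exact h1 (char_eq_of_toNat_eq h)
  · exact h2 (char_eq_of_toNat_eq h)
  · exact h3 (char_eq_of_toNat_eq h)
  · exact h4 (char_eq_of_toNat_eq h)
  · exact h5 (char_eq_of_toNat_eq h)
  · exact h6 (char_eq_of_toNat_eq h)
  · exact h7 (char_eq_of_toNat_eq h)
  · exact h8 (char_eq_of_toNat_eq h)

-- ===== VERDICT (by name: the statement is the Claim_ definition above) =====
theorem pos_str2pos_index_spec : Claim_equal_pos_str2pos_index := by
  intro pos_str _hdom _hpre
  unfold Spec_pos_str2pos_index pos_str2pos_index pos_str2pos_index_alt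
  cases h1 : PySem.Str.pyGet? pos_str 1 <;> cases h0 : PySem.Str.pyGet? pos_str 0 <;> try rfl
  rename_i c1 c0
  simp only [row_scan_eq, col_scan_eq]
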